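-- pv_equiv track=rewrite | github.com/vsvasconcelos/simple-package-template | funcs_python/funcs.py | string_proximity
-- ===== SOURCE A (Python) =====
-- def string_proximity(string_list: list[str], analyzed_string: str, threshold: int) -> list[str]:
--     """
--     Performs a string proximity analysis on a list of strings.
--
--     Args:
--         string_list:
--             A list of strings.
--         analyzed_string:
--             Analyzed string.
--         threshold:
--             An integer indicating the analysis distance threshold.
--     Returns:
--         A list containing the previous and subsequent items of each instance of the analyzed string, without
--         repetitions, according to the chosen threshold.
--
--         Example:
--             string_list : ['avocado', 'pear', 'grape', 'banana', 'apple' , 'cabbage', 'grape', 'bean', 'rice']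
--             analysis string: banana; threshold: 2
--             returns: [ 'pear', 'grape', 'apple' , 'cabbage' ]
--     """
--
--     # finds the position of the instances of the analysis string
--     analyzed_string_indexes = []
--     for i in range(len(string_list)):
--         if string_list[i] == analyzed_string:
--             analyzed_string_indexes.append(i)
--
--     # finds the position of the strings within the distance threshold
--     threshold_indexes = set()
--     for i in range(1, threshold + 1):
--         for p in analyzed_string_indexes:
--             new_threshold_index = p - i
--             if new_threshold_index >= 0:
--                 threshold_indexes.add(new_threshold_index)
--             new_threshold_index = p + i
--             if new_threshold_index <= (len(string_list) - 1):
--                 threshold_indexes.add(new_threshold_index)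
--
--     # sorts the positions
--     threshold_indexes = list(threshold_indexes)
--     threshold_indexes.sort()
--
--     # creates a list with the positions found in the previous steps
--     result_list = []
--     for p in threshold_indexes:
--         if string_list[p] not in result_list:
--             result_list.append(string_list[p])
--
--     return result_list
-- ===== SOURCE B (Python) =====
-- def string_proximity(string_list: list[str], analyzed_string: str, threshold: int) -> list[str]:
--     # gather pass: walk positions left-to-right, keep those within threshold of a match
--     matches = [q for q, s in enumerate(string_list) if s == analyzed_string]
--     seen = set()
--     result = []
--     for p, s in enumerate(string_list):
--         if any(1 <= abs(p - q) <= threshold for q in matches):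
--             if s not in seen:
--                 seen.add(s)
--                 result.append(s)
--     return result
-- ===== Notes on version B (the rewrite author's own statement) =====
-- stated objective: alternative
-- what changed: A scatters neighbor indices of each match into a set, sorts the indices, then deduplicates by scanning the result list; B makes one left-to-right gather pass over positions, including a position iff some match index is within [1,threshold] of it, with a seen-set for first-occurrence dedup, so the index set and the explicit sort disappear.
import Mathlib
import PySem

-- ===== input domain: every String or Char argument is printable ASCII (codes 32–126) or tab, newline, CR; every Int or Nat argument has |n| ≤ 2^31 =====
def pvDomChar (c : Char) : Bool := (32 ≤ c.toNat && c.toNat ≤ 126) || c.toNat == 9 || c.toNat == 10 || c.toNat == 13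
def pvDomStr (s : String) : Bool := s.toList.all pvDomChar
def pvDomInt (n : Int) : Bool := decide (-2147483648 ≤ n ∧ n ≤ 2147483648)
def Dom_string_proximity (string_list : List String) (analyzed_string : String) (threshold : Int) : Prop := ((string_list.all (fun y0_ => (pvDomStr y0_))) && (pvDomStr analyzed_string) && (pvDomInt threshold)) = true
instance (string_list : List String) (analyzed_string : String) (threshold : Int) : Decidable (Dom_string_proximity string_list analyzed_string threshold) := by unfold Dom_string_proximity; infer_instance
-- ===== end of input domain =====

-- B replaces A's scatter-into-a-set-then-sort with a single left-to-right gather pass over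
-- positions (objective: alternative decomposition, same results).

-- ===== PORT A =====
-- body of A's inner scatter loop: add p-i (if >= 0) and p+i (if <= len-1) to the index set
def pvScatterStep (N i : Int) (s : PySem.Set Int) (p : Int) : PySem.Set Int :=
  let s1 := if 0 ≤ p - i then PySem.Set.add s (p - i) else s
  if p + i ≤ N - 1 then PySem.Set.add s1 (p + i) else s1

def string_proximity (string_list : List String) (analyzed_string : String) (threshold : Int) : List String :=
  let analyzed_string_indexes : List Int :=
    (PySem.List.pyRange 0 (string_list.length : Int) 1).foldl
      (fun acc i => if PySem.List.pyGetD string_list i "" == analyzed_string then acc ++ [i] else acc) []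
  let threshold_indexes : PySem.Set Int :=
    (PySem.List.pyRange 1 (threshold + 1) 1).foldl
      (fun s i => analyzed_string_indexes.foldl (pvScatterStep (string_list.length : Int) i) s)
      PySem.Set.empty
  let threshold_indexes_sorted : List Int := PySem.List.sorted threshold_indexes (fun x => x) false
  threshold_indexes_sorted.foldl
    (fun result_list p =>
      if result_list.contains (PySem.List.pyGetD string_list p "") then result_list
      else result_list ++ [PySem.List.pyGetD string_list p ""]) []

-- ===== PORT B =====
def string_proximity_alt (string_list : List String) (analyzed_string : String) (threshold : Int) : List String :=
  let matches_ : List Int :=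
    ((PySem.List.enumerate string_list 0).filter (fun qs => qs.2 == analyzed_string)).map (fun qs => qs.1)
  ((PySem.List.enumerate string_list 0).foldl
    (fun st ps =>
      if matches_.any (fun q => decide (1 ≤ |ps.1 - q| ∧ |ps.1 - q| ≤ threshold)) then
        if PySem.Set.contains st.1 ps.2 then st
        else (PySem.Set.add st.1 ps.2, st.2 ++ [ps.2])
      else st)
    (PySem.Set.empty, ([] : List String))).2

-- ===== PRECONDITION & SPEC =====
def Spec_string_proximity (string_list : List String) (analyzed_string : String) (threshold : Int) (out : List String) : Prop := out = string_proximity_alt string_list analyzed_string threshold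
instance (string_list : List String) (analyzed_string : String) (threshold : Int) (out : List String) : Decidable (Spec_string_proximity string_list analyzed_string threshold out) := by unfold Spec_string_proximity; infer_instance

-- ===== CLAIM (what is proved, stated in full; the proofs are below) =====
def Claim_equal_string_proximity : Prop := ∀ (string_list : List String) (analyzed_string : String) (threshold : Int), Dom_string_proximity string_list analyzed_string threshold → Spec_string_proximity string_list analyzed_string threshold (string_proximity string_list analyzed_string threshold)

-- ===== LEMMAS AND PROOFS =====

-- the filtered positions of the target string
def pvIdxs (sl : List String) (a : String) : List Int :=
  (PySem.List.pyRange 0 (sl.length : Int) 1).filter (fun i => PySem.List.pyGetD sl i "" == a)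

lemma pv_idxs_mem {sl : List String} {a : String} {q : Int} (h : q ∈ pvIdxs sl a) :
    0 ≤ q ∧ q < (sl.length : Int) := by
  have := (List.mem_filter.mp h).1
  exact (PySem.List.mem_pyRange_one.mp this)

lemma pv_inner_mem (N i : Int) (l : List Int) (s : PySem.Set Int) (x : Int) :
    x ∈ l.foldl (pvScatterStep N i) s ↔
      x ∈ s ∨ ∃ q ∈ l, ((x = q - i ∧ 0 ≤ x) ∨ (x = q + i ∧ x ≤ N - 1)) := by
  induction l generalizing s with
  | nil => simp
  | cons q l ih =>
    rw [List.foldl_cons, ih]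
    have hstep : x ∈ pvScatterStep N i s q ↔
        x ∈ s ∨ ((x = q - i ∧ 0 ≤ x) ∨ (x = q + i ∧ x ≤ N - 1)) := by
      simp only [pvScatterStep]
      split_ifs with h1 h2 h2
      · have hA : x = q - i → 0 ≤ x := fun h => by omega
        have hB : x = q + i → x ≤ N - 1 := fun h => by omega
        simp only [PySem.Set.mem_add]; tauto
      · have hA : ¬(x = q - i ∧ 0 ≤ x) := by omega
        have hB : x = q + i → x ≤ N - 1 := fun h => by omega
        simp only [PySem.Set.mem_add]; tauto
      · have hA : x = q - i → 0 ≤ x := fun h => by omega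
        have hB : ¬(x = q + i ∧ x ≤ N - 1) := by omega
        simp only [PySem.Set.mem_add]; tauto
      · have hA : ¬(x = q - i ∧ 0 ≤ x) := by omega
        have hB : ¬(x = q + i ∧ x ≤ N - 1) := by omega
        tauto
    rw [hstep]
    simp only [List.mem_cons]
    constructor
    · rintro (h | ⟨p, hp, hd⟩)
      · rcases h with h | h
        · exact Or.inl h
        · exact Or.inr ⟨q, Or.inl rfl, h⟩
      · exact Or.inr ⟨p, Or.inr hp, hd⟩
    · rintro (h | ⟨p, hp | hp, hd⟩)
      · exact Or.inl (Or.inl h)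
      · exact Or.inl (Or.inr (hp ▸ hd))
      · exact Or.inr ⟨p, hp, hd⟩

lemma pv_inner_nodup (N i : Int) (l : List Int) (s : PySem.Set Int) (h : s.Nodup) :
    (l.foldl (pvScatterStep N i) s).Nodup := by
  induction l generalizing s with
  | nil => exact h
  | cons q l ih =>
    rw [List.foldl_cons]
    apply ih
    simp only [pvScatterStep]
    split_ifs with h1 h2 h2
    · exact PySem.Set.nodup_add _ _ (PySem.Set.nodup_add _ _ h)
    · exact PySem.Set.nodup_add _ _ h
    · exact PySem.Set.nodup_add _ _ h
    · exact h

lemma pv_outer_mem (N : Int) (il l : List Int) (s : PySem.Set Int) (x : Int) :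
    x ∈ il.foldl (fun s i => l.foldl (pvScatterStep N i) s) s ↔
      x ∈ s ∨ ∃ i ∈ il, ∃ q ∈ l, ((x = q - i ∧ 0 ≤ x) ∨ (x = q + i ∧ x ≤ N - 1)) := by
  induction il generalizing s with
  | nil => simp
  | cons i il ih =>
    rw [List.foldl_cons, ih, pv_inner_mem]
    simp only [List.mem_cons]
    constructor
    · rintro ((h | ⟨q, hq, hd⟩) | ⟨j, hj, q, hq, hd⟩)
      · exact Or.inl h
      · exact Or.inr ⟨i, Or.inl rfl, q, hq, hd⟩
      · exact Or.inr ⟨j, Or.inr hj, q, hq, hd⟩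
    · rintro (h | ⟨j, hj | hj, q, hq, hd⟩)
      · exact Or.inl (Or.inl h)
      · exact Or.inl (Or.inr ⟨q, hq, hj ▸ hd⟩)
      · exact Or.inr ⟨j, hj, q, hq, hd⟩

lemma pv_outer_nodup (N : Int) (il l : List Int) (s : PySem.Set Int) (h : s.Nodup) :
    (il.foldl (fun s i => l.foldl (pvScatterStep N i) s) s).Nodup := by
  induction il generalizing s with
  | nil => exact h
  | cons i il ih => exact ih _ (pv_inner_nodup N i l s h)

-- the sorted scattered index set IS the in-order filter of all positions
lemma pv_sorted_eq_filter (sl : List String) (a : String) (th : Int) :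
    PySem.List.sorted
      ((PySem.List.pyRange 1 (th + 1) 1).foldl
        (fun s i => (pvIdxs sl a).foldl (pvScatterStep (sl.length : Int) i) s) PySem.Set.empty)
      (fun x => x) false
    = (PySem.List.pyRange 0 (sl.length : Int) 1).filter
        (fun p => (pvIdxs sl a).any (fun q => decide (1 ≤ |p - q| ∧ |p - q| ≤ th))) := by
  apply PySem.List.sorted_eq_of_perm_of_pairwise_lt
  · rw [show (PySem.Set.empty : PySem.Set Int) = [] from rfl]
    apply (List.perm_ext_iff_of_nodup
      ((PySem.List.nodup_pyRange_one 0 (sl.length : Int)).filter _)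
      (pv_outer_nodup _ _ _ _ List.nodup_nil)).mpr
    intro x
    rw [List.mem_filter, pv_outer_mem, PySem.List.mem_pyRange_one, List.any_eq_true]
    simp only [List.not_mem_nil, false_or]
    constructor
    · rintro ⟨⟨hx0, hxN⟩, q, hq, hd⟩
      have hd' := of_decide_eq_true hd
      obtain ⟨hq0, hqN⟩ := pv_idxs_mem hq
      refine ⟨|x - q|, ?_, q, hq, ?_⟩
      · rw [PySem.List.mem_pyRange_one]
        exact ⟨hd'.1, Int.lt_add_one_iff.mpr hd'.2⟩
      · rcases abs_cases (x - q) with ⟨he, h0⟩ | ⟨he, h0⟩ <;> rw [he] <;> omega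
    · rintro ⟨i, hi, q, hq, hd⟩
      rw [PySem.List.mem_pyRange_one] at hi
      obtain ⟨hq0, hqN⟩ := pv_idxs_mem hq
      rcases hd with ⟨hx, hxb⟩ | ⟨hx, hxb⟩ <;>
        · refine ⟨⟨by omega, by omega⟩, q, hq, decide_eq_true ?_⟩
          rcases abs_cases (x - q) with ⟨he, h0⟩ | ⟨he, h0⟩ <;> rw [he] <;> omega
  · exact (PySem.List.pairwise_lt_pyRange_one 0 (sl.length : Int)).filter _

-- A's "if v not in result: result.append(v)" loop is a fold of Set.add over the mapped list
lemma pv_dedup (l : List Int) (g : Int → String) (r : List String) :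
    l.foldl (fun result_list p =>
        if result_list.contains (g p) then result_list else result_list ++ [g p]) r
    = (l.map g).foldl PySem.Set.add r := by
  rw [List.foldl_map]; rfl

-- B's gather loop with a seen-set that mirrors the result list
lemma pv_bloop (c : Int → Bool) (l : List (Int × String)) (r : List String) :
    l.foldl (fun st ps =>
        if c ps.1 then
          if PySem.Set.contains st.1 ps.2 then st
          else (PySem.Set.add st.1 ps.2, st.2 ++ [ps.2])
        else st) (r, r)
    = (((l.filter (fun ps => c ps.1)).map (fun ps => ps.2)).foldl PySem.Set.add r,
       ((l.filter (fun ps => c ps.1)).map (fun ps => ps.2)).foldl PySem.Set.add r) := by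
  induction l generalizing r with
  | nil => rfl
  | cons ps l ih =>
    simp only [List.foldl_cons, List.filter_cons]
    by_cases hc : c ps.1
    · simp only [hc, reduceIte]
      by_cases hm : ps.2 ∈ r
      · have hmb : PySem.Set.contains r ps.2 = true := by simpa using hm
        have hadd : PySem.Set.add r ps.2 = r := PySem.Set.add_of_mem hm
        simp only [hmb, reduceIte, List.map_cons, List.foldl_cons, hadd]
        exact ih r
      · have hmb : PySem.Set.contains r ps.2 = false := by simpa using hm
        have hadd : PySem.Set.add r ps.2 = r ++ [ps.2] := PySem.Set.add_of_not_mem hm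
        simp only [hmb, List.map_cons, List.foldl_cons, ← hadd]
        exact ih (PySem.Set.add r ps.2)
    · have hcb : c ps.1 = false := by simpa using hc
      simp only [hcb]
      exact ih r

lemma pv_matches_eq (sl : List String) (a : String) :
    ((PySem.List.enumerate sl 0).filter (fun qs => qs.2 == a)).map (fun qs => qs.1)
    = pvIdxs sl a := by
  rw [PySem.List.enumerate_eq_map_pyRange (d := ""), List.filter_map, List.map_map]
  unfold pvIdxs
  simp [Function.comp_def]

-- ===== VERDICT (by name: the statement is the Claim_ definition above) =====
theorem string_proximity_spec : Claim_equal_string_proximity := by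
  intro sl a th _hdom
  unfold Spec_string_proximity
  simp only [string_proximity, string_proximity_alt]
  rw [pv_matches_eq]
  have hidx :
      (PySem.List.pyRange 0 (sl.length : Int) 1).foldl
        (fun acc i => if PySem.List.pyGetD sl i "" == a then acc ++ [i] else acc) []
      = pvIdxs sl a := by
    rw [PySem.List.foldl_append_if_eq_filter]; rfl
  rw [hidx, pv_sorted_eq_filter sl a th, pv_dedup,
    show (PySem.Set.empty : PySem.Set String) = [] from rfl,
    pv_bloop (fun p => (pvIdxs sl a).any (fun q => decide (1 ≤ |p - q| ∧ |p - q| ≤ th)))]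
  rw [PySem.List.enumerate_eq_map_pyRange (d := ""), List.filter_map, List.map_map]
  simp [Function.comp_def]
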